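-- pv_equiv track=rewrite | github.com/csaftoiu/ghe-experiment | model.py | find_material_column
-- ===== SOURCE A (Python) =====
-- def find_material_column(df_columns, material_prefix):
--     """Find column that starts with the given material prefix.
--
--     Args:
--         df_columns: List of column names from the dataframe
--         material_prefix: Material name to search for (e.g. 'CaF2', 'Sapph', 'Boro')
--
--     Returns:
--         Column name if found, None otherwise
--     """
--     # Normalize the prefix for comparison
--     prefix_lower = material_prefix.lower()
--
--     # Look for exact prefix match (case-insensitive)
--     for col in df_columns:
--         if col.lower().startswith(prefix_lower + '/'):
--             return col
--
--     # Try alternate names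
--     alternates = {
--         'caf2': ['caf2', 'calcium fluoride'],
--         'sapph': ['sapph', 'sapphire'],
--         'boro': ['boro', 'borosilicate']
--     }
--
--     if prefix_lower in alternates:
--         for alt in alternates[prefix_lower]:
--             for col in df_columns:
--                 if col.lower().startswith(alt + '/'):
--                     return col
--
--     return None
-- ===== SOURCE B (Python) =====
-- ALTERNATES = {
--     'caf2': ['caf2', 'calcium fluoride'],
--     'sapph': ['sapph', 'sapphire'],
--     'boro': ['boro', 'borosilicate'],
-- }
--
--
-- def find_material_column(df_columns, material_prefix):
--     """Single column-major pass: for each column compute the rank of the first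
--     candidate prefix it matches, and keep the column with the smallest rank
--     (earliest column wins ties), instead of one full scan per candidate."""
--     prefix_lower = material_prefix.lower()
--     candidates = ALTERNATES.get(prefix_lower, [prefix_lower])
--     best = None  # (rank, column)
--     for col in df_columns:
--         low = col.lower()
--         for rank, cand in enumerate(candidates):
--             if low.startswith(cand + '/'):
--                 if best is None or rank < best[0]:
--                     best = (rank, col)
--                 break
--     return None if best is None else best[1]
-- ===== Notes on version B (the rewrite author's own statement) =====
-- stated objective: alternative
-- what changed: Replaces A's candidate-major repeated scans of the column list by a single column-major pass that computes each column's first-matching-candidate rank and keeps the minimal-rank (earliest) column, proving the argmin equals A's priority order.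
import Mathlib
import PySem

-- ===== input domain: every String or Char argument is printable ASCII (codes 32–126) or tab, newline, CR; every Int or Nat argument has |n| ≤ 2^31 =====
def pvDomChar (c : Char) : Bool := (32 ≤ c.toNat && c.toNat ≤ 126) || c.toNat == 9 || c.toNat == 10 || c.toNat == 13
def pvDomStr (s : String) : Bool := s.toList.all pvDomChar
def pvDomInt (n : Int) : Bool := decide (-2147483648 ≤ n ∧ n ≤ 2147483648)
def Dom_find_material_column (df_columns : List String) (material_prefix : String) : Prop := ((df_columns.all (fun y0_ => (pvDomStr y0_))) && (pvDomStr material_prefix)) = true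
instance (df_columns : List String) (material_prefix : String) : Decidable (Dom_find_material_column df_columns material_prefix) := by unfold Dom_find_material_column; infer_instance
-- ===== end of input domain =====

-- B replaces A's candidate-major repeated scans by ONE column-major pass keeping the
-- minimal-candidate-rank column (argmin, earliest column on ties); same result, same cost.

-- ===== PORT A =====
-- 'for col in df_columns: if col.lower().startswith(prefix_lower + "/"): return col'
def pvLoopA (df_columns : List String) (p : String) : Option String :=
  match df_columns with
  | [] => none
  | col :: rest =>
      if PySem.Str.startswith (PySem.Str.lower col) (p ++ "/") then some col
      else pvLoopA rest p

-- 'for alt in alternates[prefix_lower]: for col in df_columns: … return col'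
def pvLoopAlts (df_columns : List String) (alts : List String) : Option String :=
  match alts with
  | [] => none
  | alt :: rest =>
      match pvLoopA df_columns alt with
      | some col => some col
      | none => pvLoopAlts df_columns rest

def pvAlternates : PySem.Dict String (List String) :=
  PySem.Dict.ofList [("caf2", ["caf2", "calcium fluoride"]),
                     ("sapph", ["sapph", "sapphire"]),
                     ("boro", ["boro", "borosilicate"])]

def find_material_column (df_columns : List String) (material_prefix : String) : Option String :=
  let prefix_lower := PySem.Str.lower material_prefix
  match pvLoopA df_columns prefix_lower with
  | some col => some col
  | none =>
      -- 'if prefix_lower in alternates: for alt in alternates[prefix_lower]: …'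
      match pvAlternates.get? prefix_lower with
      | some alts => pvLoopAlts df_columns alts
      | none => none

-- ===== PORT B =====
-- inner 'for rank, cand in enumerate(candidates): if low.startswith(cand + "/"): … break'
def pvRankB (low : String) (cands : List String) (i : Nat) : Option Nat :=
  match cands with
  | [] => none
  | c :: rest =>
      if PySem.Str.startswith low (c ++ "/") then some i
      else pvRankB low rest (i + 1)

-- loop body: update 'best' if this column's rank beats it
def pvStepB (cands : List String) (best : Option (Nat × String)) (col : String) :
    Option (Nat × String) :=
  match pvRankB (PySem.Str.lower col) cands 0 with
  | none => best
  | some r =>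
      match best with
      | none => some (r, col)
      | some (br, bc) => if r < br then some (r, col) else some (br, bc)

def find_material_column_alt (df_columns : List String) (material_prefix : String) : Option String :=
  let prefix_lower := PySem.Str.lower material_prefix
  let candidates := pvAlternates.getD prefix_lower [prefix_lower]
  match df_columns.foldl (pvStepB candidates) none with
  | none => none
  | some (_, col) => some col

-- ===== PRECONDITION & SPEC =====
def Spec_find_material_column (df_columns : List String) (material_prefix : String) (out : Option String) : Prop := out = find_material_column_alt df_columns material_prefix
instance (df_columns : List String) (material_prefix : String) (out : Option String) : Decidable (Spec_find_material_column df_columns material_prefix out) := by unfold Spec_find_material_column; infer_instance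

-- ===== CLAIM =====
def Claim_equal_find_material_column : Prop := ∀ (df_columns : List String) (material_prefix : String), Dom_find_material_column df_columns material_prefix → Spec_find_material_column df_columns material_prefix (find_material_column df_columns material_prefix)

-- ===== LEMMAS AND PROOFS =====

-- a rank-0 best is absorbing: nothing can beat it
theorem pvStepB_zero (cands : List String) (x : String) (col : String) :
    pvStepB cands (some (0, x)) col = some (0, x) := by
  unfold pvStepB
  cases pvRankB (PySem.Str.lower col) cands 0 <;> simp

theorem foldl_stepB_zero (cands : List String) (df : List String) (x : String) :
    df.foldl (pvStepB cands) (some (0, x)) = some (0, x) := by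
  induction df with
  | nil => rfl
  | cons c rest ih => simp [List.foldl, pvStepB_zero, ih]

-- rank on a two-candidate list, unfolded
theorem pvRankB_pair (low c0 c1 : String) :
    pvRankB low [c0, c1] 0 =
      (if PySem.Str.startswith low (c0 ++ "/") then some 0
       else if PySem.Str.startswith low (c1 ++ "/") then some 1 else none) := by
  simp [pvRankB]

-- with a rank-1 best, the fold only improves to the first rank-0 (c0-matching) column
theorem foldl_stepB_one (c0 c1 : String) (df : List String) (y : String) :
    df.foldl (pvStepB [c0, c1]) (some (1, y)) =
      (match pvLoopA df c0 with
       | some col => some (0, col)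
       | none => some (1, y)) := by
  induction df with
  | nil => rfl
  | cons h t ih =>
      simp only [List.foldl, pvLoopA]
      by_cases h0 : PySem.Chars.startswith (PySem.Chars.lower h.toList) (c0.toList ++ ['/']) = true
      · simp [pvStepB, pvRankB_pair, h0, foldl_stepB_zero]
      · by_cases h1 : PySem.Chars.startswith (PySem.Chars.lower h.toList) (c1.toList ++ ['/']) = true
        · simp [pvStepB, pvRankB_pair, h0, h1, ih]
        · simp [pvStepB, pvRankB_pair, h0, h1, ih]

-- column-major argmin over two candidates = candidate-major two scans
theorem foldl_stepB_pair (c0 c1 : String) (df : List String) :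
    (match df.foldl (pvStepB [c0, c1]) none with
     | none => none
     | some (_, col) => some col) =
      (match pvLoopA df c0 with
       | some col => some col
       | none => pvLoopA df c1) := by
  induction df with
  | nil => rfl
  | cons h t ih =>
      simp only [List.foldl, pvLoopA]
      by_cases h0 : PySem.Chars.startswith (PySem.Chars.lower h.toList) (c0.toList ++ ['/']) = true
      · simp [pvStepB, pvRankB_pair, h0, foldl_stepB_zero]
      · by_cases h1 : PySem.Chars.startswith (PySem.Chars.lower h.toList) (c1.toList ++ ['/']) = true
        · have h0s : ¬ PySem.Str.startswith (PySem.Str.lower h) (c0 ++ "/") = true := by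
            simpa using h0
          have h1s : PySem.Str.startswith (PySem.Str.lower h) (c1 ++ "/") = true := by
            simpa using h1
          simp only [pvStepB, pvRankB_pair]
          rw [if_neg h0s, if_pos h1s, foldl_stepB_one]
          cases hA : pvLoopA t c0 <;> simp [h0, h1]
        · simpa [pvStepB, pvRankB_pair, h0, h1] using ih

-- column-major argmin over one candidate = one scan
theorem foldl_stepB_single (c0 : String) (df : List String) :
    (match df.foldl (pvStepB [c0]) none with
     | none => none
     | some (_, col) => some col) = pvLoopA df c0 := by
  induction df with
  | nil => rfl
  | cons h t ih =>
      simp only [List.foldl, pvLoopA]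
      by_cases h0 : PySem.Chars.startswith (PySem.Chars.lower h.toList) (c0.toList ++ ['/']) = true
      · simp [pvStepB, pvRankB, h0, foldl_stepB_zero]
      · simpa [pvStepB, pvRankB, h0] using ih

-- closed form of the literal alternates table lookup
theorem pvAlternates_get? (p : String) : pvAlternates.get? p =
    if p = "caf2" then some ["caf2", "calcium fluoride"]
    else if p = "sapph" then some ["sapph", "sapphire"]
    else if p = "boro" then some ["boro", "borosilicate"]
    else none := by
  have hi : pvAlternates.items = [("caf2", ["caf2", "calcium fluoride"]),
      ("sapph", ["sapph", "sapphire"]), ("boro", ["boro", "borosilicate"])] := by decide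
  by_cases h1 : p = "caf2"
  · subst h1; decide
  · by_cases h2 : p = "sapph"
    · subst h2; decide
    · by_cases h3 : p = "boro"
      · subst h3; decide
      · have e1 : ("caf2" == p) = false := beq_eq_false_iff_ne.mpr (Ne.symm h1)
        have e2 : ("sapph" == p) = false := beq_eq_false_iff_ne.mpr (Ne.symm h2)
        have e3 : ("boro" == p) = false := beq_eq_false_iff_ne.mpr (Ne.symm h3)
        simp only [h1, h2, h3, if_false]
        simp [PySem.Dict.get?, hi, List.find?, e1, e2, e3]

-- pair case: A's own first pass uses c0, the first element of the alternates list
theorem pair_case (c0 c1 : String) (df : List String) :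
    (match pvLoopA df c0 with
     | some col => some col
     | none => pvLoopAlts df [c0, c1]) =
      (match df.foldl (pvStepB [c0, c1]) none with
       | none => none
       | some (_, col) => some col) := by
  rw [foldl_stepB_pair]
  cases hA : pvLoopA df c0
  · cases hB : pvLoopA df c1 <;> simp [pvLoopAlts, hA, hB]
  · simp

theorem find_material_column_eq (df_columns : List String) (material_prefix : String) :
    find_material_column df_columns material_prefix = find_material_column_alt df_columns material_prefix := by
  simp only [find_material_column, find_material_column_alt]
  rw [PySem.Dict.getD_eq_get?_getD, pvAlternates_get? (PySem.Str.lower material_prefix)]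
  set p := PySem.Str.lower material_prefix with hp
  split_ifs with h1 h2 h3
  · rw [h1]; exact pair_case "caf2" "calcium fluoride" df_columns
  · rw [h2]; exact pair_case "sapph" "sapphire" df_columns
  · rw [h3]; exact pair_case "boro" "borosilicate" df_columns
  · rw [Option.getD_none, foldl_stepB_single]
    cases pvLoopA df_columns p <;> simp

-- ===== VERDICT =====
theorem find_material_column_spec : Claim_equal_find_material_column := by
  intro df_columns material_prefix _
  unfold Spec_find_material_column
  exact find_material_column_eq df_columns material_prefix
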